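-- pv_equiv track=rewrite | github.com/hoangHEDSPI/interview_task | leetcode/1402_reducing_dishes.py | maxSatisfaction
-- ===== SOURCE A (Python) =====
-- from typing import List
--
-- def maxSatisfaction(satisfaction: List[int]) -> int:
--     sa_len = len(satisfaction)
--     if sa_len == 1:
--         return satisfaction[0] if satisfaction[0] > 0 else 0
--
--     first_sum = 0
--     max_res = 0
--     sa_sum = [0 for _ in range(sa_len + 1)]
--
--     satisfaction.sort()
--
--     # calculate the result if we start making dishes from the
--     # first dish
--     for i in range(sa_len):
--         first_sum += (i+1)*satisfaction[i]
--
--     if max_res < first_sum: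
--         max_res = first_sum
--
--     for i in range(sa_len-1, -1, -1):
--         sa_sum[i] = sa_sum[i+1] + satisfaction[i]
--
--     for i in range(sa_len):
--         first_sum -= sa_sum[i]
--         if max_res < first_sum:
--             max_res = first_sum
--     return max_res
-- ===== SOURCE B (Python) =====
-- from typing import List
--
-- def maxSatisfaction(satisfaction: List[int]) -> int:
--     # sort ascending in place (same mutation as A), then one greedy pass
--     # over the dishes from best to worst with a running suffix sum.
--     satisfaction.sort()
--     total = 0
--     cur = 0
--     for x in reversed(satisfaction):
--         cur += x
--         if cur > 0:
--             total += cur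
--         else:
--             break
--     return total
-- ===== Notes on version B (the rewrite author's own statement) =====
-- stated objective: simpler
-- what changed: Replaces A's three index passes (weighted full sum, explicit suffix-sum array, subtract-and-track-max) by a single greedy pass over the sorted list in descending order that keeps one running suffix sum and adds it to the total while it stays positive.
import Mathlib
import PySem

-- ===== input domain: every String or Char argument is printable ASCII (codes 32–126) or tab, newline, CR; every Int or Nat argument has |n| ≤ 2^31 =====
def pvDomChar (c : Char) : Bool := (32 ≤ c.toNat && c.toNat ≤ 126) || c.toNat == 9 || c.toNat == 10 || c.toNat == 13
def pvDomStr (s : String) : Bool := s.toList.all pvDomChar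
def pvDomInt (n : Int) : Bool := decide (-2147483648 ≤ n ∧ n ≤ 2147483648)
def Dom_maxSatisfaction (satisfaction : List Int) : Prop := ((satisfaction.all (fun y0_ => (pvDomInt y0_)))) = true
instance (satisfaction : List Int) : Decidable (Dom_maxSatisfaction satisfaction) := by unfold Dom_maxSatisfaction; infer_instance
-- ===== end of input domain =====

-- B replaces A's three index passes with one greedy descending pass keeping a running
-- suffix sum (objective: simpler). Both Pythons sort the argument in place (same
-- mutation); the equivalence proved here is about the return value.

-- ===== PORT A =====
def maxSatisfaction (satisfaction : List Int) : Int :=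
  let sa_len : Int := PySem.List.len satisfaction
  if sa_len = 1 then
    -- index 0 is in range for a length-1 list, so pyGetD is exact here
    if PySem.List.pyGetD satisfaction 0 0 > 0 then PySem.List.pyGetD satisfaction 0 0 else 0
  else
    let first_sum : Int := 0
    let max_res : Int := 0
    let sa_sum : List Int := (PySem.List.pyRange 0 (sa_len + 1) 1).map (fun _ => 0)
    let s : List Int := PySem.List.sorted satisfaction (fun x => x) false
    let first_sum : Int :=
      (PySem.List.pyRange 0 sa_len 1).foldl
        (fun fs i => fs + (i + 1) * PySem.List.pyGetD s i 0) first_sum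
    let max_res : Int := if max_res < first_sum then first_sum else max_res
    -- sa_sum[i] = sa_sum[i+1] + satisfaction[i]: i ∈ [0, sa_len-1] is always a valid
    -- index, so List.set i.toNat / pyGetD are exact for this assignment and these reads
    let sa_sum : List Int :=
      (PySem.List.pyRange (sa_len - 1) (-1) (-1)).foldl
        (fun arr i =>
          arr.set i.toNat (PySem.List.pyGetD arr (i + 1) 0 + PySem.List.pyGetD s i 0)) sa_sum
    let st : Int × Int :=
      (PySem.List.pyRange 0 sa_len 1).foldl
        (fun st i =>
          let fs := st.1 - PySem.List.pyGetD sa_sum i 0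
          (fs, if st.2 < fs then fs else st.2)) (first_sum, max_res)
    st.2

-- ===== PORT B =====
-- the loop of Source B: cur += x; if cur > 0: total += cur else break
def altGo : List Int → Int → Int → Int
  | [], _, total => total
  | x :: r, cur, total =>
    let cur' := cur + x
    if cur' > 0 then altGo r cur' (total + cur') else total

def maxSatisfaction_alt (satisfaction : List Int) : Int :=
  altGo (PySem.List.sorted satisfaction (fun x => x) false).reverse 0 0

-- ===== PRECONDITION & SPEC =====
def Spec_maxSatisfaction (satisfaction : List Int) (out : Int) : Prop := out = maxSatisfaction_alt satisfaction
instance (satisfaction : List Int) (out : Int) : Decidable (Spec_maxSatisfaction satisfaction out) := by unfold Spec_maxSatisfaction; infer_instance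

-- ===== CLAIM (what is proved, stated in full; the proofs are below) =====
def Claim_equal_maxSatisfaction : Prop := ∀ (satisfaction : List Int), Dom_maxSatisfaction satisfaction → Spec_maxSatisfaction satisfaction (maxSatisfaction satisfaction)

-- ===== LEMMAS AND PROOFS =====

-- A's first loop computes Σ (i+1)*s[i]
def eSum (s : List Int) : Int := ((PySem.List.enumerate s 0).map (fun p => (p.1 + 1) * p.2)).sum

-- the suffix-sum array A builds: suf s = [Σ s.drop 0, Σ s.drop 1, …, 0], length s.length + 1
def suf : List Int → List Int
  | [] => [0]
  | x :: xs => (x + (suf xs).headI) :: suf xs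

-- weighted value of serving all of r (descending prefix view), with carry c:
-- FB c r = |r|*c + Σ_j (prefix sum of r of length j)
def FB (c : Int) : List Int → Int
  | [] => 0
  | x :: xs => (c + x) + FB (c + x) xs

-- best value over all prefixes of r with carry c
def M (c : Int) : List Int → Int
  | [] => 0
  | x :: xs => max 0 ((c + x) + M (c + x) xs)

-- best value over all suffixes of the ascending list s
def bestSuf : List Int → Int
  | [] => 0
  | x :: xs => max (eSum (x :: xs)) (bestSuf xs)

lemma suf_headI (t : List Int) : (suf t).headI = t.sum := by
  induction t with
  | nil => simp [suf]
  | cons x xs ih => simp [suf, ih]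

lemma suf_length (t : List Int) : (suf t).length = t.length + 1 := by
  induction t with
  | nil => simp [suf]
  | cons x xs ih => simp [suf, ih]

lemma eSum_nil : eSum [] = 0 := by simp [eSum]

lemma enumerate_weight_shift (xs : List Int) (k : Int) :
    ((PySem.List.enumerate xs (k + 1)).map (fun p => (p.1 + 1) * p.2)).sum
      = ((PySem.List.enumerate xs k).map (fun p => (p.1 + 1) * p.2)).sum + xs.sum := by
  induction xs generalizing k with
  | nil => simp [PySem.List.enumerate_nil]
  | cons y ys ih => simp [PySem.List.enumerate_cons, ih]; ring

lemma eSum_cons (x : Int) (xs : List Int) : eSum (x :: xs) = x + xs.sum + eSum xs := by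
  have h := enumerate_weight_shift xs 0
  simp [eSum, PySem.List.enumerate_cons] at *
  omega

lemma M_nonneg (c : Int) (r : List Int) : 0 ≤ M c r := by
  cases r with
  | nil => simp [M]
  | cons x xs => simp [M]

lemma M_zero_of_nonpos (r : List Int) (c : Int) (hr : ∀ y ∈ r, y ≤ 0) (hc : c ≤ 0) :
    M c r = 0 := by
  induction r generalizing c with
  | nil => rfl
  | cons x xs ih =>
    have hx : x ≤ 0 := hr x (by simp)
    have hz : M (c + x) xs = 0 :=
      ih (c + x) (fun y hy => hr y (List.mem_cons_of_mem _ hy)) (by omega)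
    rw [M, hz]
    simp [max_def]
    omega

lemma altGo_eq_M (r : List Int) (c t : Int) (hr : r.Pairwise (fun a b => b ≤ a)) (hc : 0 ≤ c) :
    altGo r c t = t + M c r := by
  induction r generalizing c t with
  | nil => simp [altGo, M]
  | cons x xs ih =>
    rcases List.pairwise_cons.mp hr with ⟨hx, hxs⟩
    by_cases h : c + x > 0
    · have hM := M_nonneg (c + x) xs
      rw [altGo, if_pos h, ih (c + x) (t + (c + x)) hxs (by omega)]
      rw [M]
      simp [max_def]
      split_ifs <;> omega
    · have hz : M (c + x) xs = 0 :=
        M_zero_of_nonpos xs (c + x) (fun y hy => by have := hx y hy; omega) (by omega)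
      rw [altGo, if_neg h]
      rw [M, hz]
      simp [max_def]
      omega

lemma FB_append_single (u : List Int) (c x : Int) :
    FB c (u ++ [x]) = FB c u + (c + u.sum + x) := by
  induction u generalizing c with
  | nil => simp [FB]
  | cons y ys ih => simp [FB, ih]; ring

lemma eSum_eq_FB (t : List Int) : eSum t = FB 0 t.reverse := by
  induction t with
  | nil => simp [eSum_nil, FB]
  | cons x xs ih =>
    rw [eSum_cons, List.reverse_cons, FB_append_single, ← ih]
    simp
    ring

lemma M_append_single (u : List Int) (c x : Int) :
    M c (u ++ [x]) = max (M c u) (FB c (u ++ [x])) := by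
  induction u generalizing c with
  | nil => simp [M, FB]
  | cons y ys ih =>
    simp only [List.cons_append, M, FB, ih (c + y)]
    simp [max_def]
    split_ifs <;> omega

lemma bestSuf_eq_M (s : List Int) : bestSuf s = M 0 s.reverse := by
  induction s with
  | nil => simp [bestSuf, M]
  | cons x xs ih =>
    rw [bestSuf, ih, eSum_eq_FB, List.reverse_cons, M_append_single]
    exact max_comm _ _

lemma bestSuf_nonneg (s : List Int) : 0 ≤ bestSuf s := by
  rw [bestSuf_eq_M]; exact M_nonneg 0 s.reverse

-- the suffix-sum array invariant for A's middle loop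
lemma drop_set_cons {α : Type} (arr : List α) (m : Nat) (v : α) (h : m < arr.length) :
    (arr.set m v).drop m = v :: arr.drop (m + 1) := by
  induction arr generalizing m with
  | nil => simp at h
  | cons a as ih =>
    cases m with
    | zero => simp
    | succ k => simpa using ih k (by simpa using h)

lemma sa_sum_loop (s : List Int) (m : Nat) (hm : m ≤ s.length) :
    ∀ arr : List Int, arr.length = s.length + 1 → arr.drop m = suf (s.drop m) →
    (PySem.List.pyRange ((m : Int) - 1) (-1) (-1)).foldl
      (fun arr i =>
        arr.set i.toNat (PySem.List.pyGetD arr (i + 1) 0 + PySem.List.pyGetD s i 0)) arr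
      = suf s := by
  induction m with
  | zero =>
    intro arr _ hdrop
    rw [PySem.List.pyRange_neg_one_eq_nil (by omega)]
    simpa using hdrop
  | succ k ih =>
    intro arr hlen hdrop
    have hk : k < s.length := by omega
    have hcast : ((k + 1 : Nat) : Int) - 1 = (k : Int) := by push_cast; ring
    rw [hcast, PySem.List.pyRange_neg_one_cons (by omega : (-1 : Int) < (k : Int)), List.foldl_cons]
    set v := PySem.List.pyGetD arr ((k : Int) + 1) 0 + PySem.List.pyGetD s (k : Int) 0 with hv
    apply ih (by omega)
    · simpa using hlen
    · -- (arr.set k v).drop k = suf (s.drop k)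
      have hsk : s.drop k = s[k] :: s.drop (k + 1) := by
        rw [List.drop_eq_getElem_cons hk]
      have hlt : k + 1 < arr.length := by omega
      have harr1 : PySem.List.pyGetD arr ((k : Int) + 1) 0 = (s.drop (k + 1)).sum := by
        have h1 : PySem.List.pyGetD arr ((k : Int) + 1) 0 = arr[k + 1] := by
          rw [show ((k : Int) + 1) = ((k + 1 : Nat) : Int) by push_cast; ring,
            PySem.List.pyGetD_natCast, List.getD_eq_getElem _ _ hlt]
        have h2 : arr[k + 1] = (arr.drop (k + 1)).headI := by
          rw [List.drop_eq_getElem_cons (by omega)]; rfl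
        rw [h1, h2, hdrop, suf_headI]
      have harr2 : PySem.List.pyGetD s (k : Int) 0 = s[k] := by
        rw [PySem.List.pyGetD_natCast, List.getD_eq_getElem _ _ hk]
      have hset : ((k : Int)).toNat = k := by omega
      rw [hset, drop_set_cons arr k v (by omega), hdrop, hsk, suf]
      congr 1
      rw [hv, harr1, harr2, suf_headI]
      ring

-- A's last loop, expressed over q = (suf s).take s.length
def loopFold (s : List Int) (m : Int) : Int :=
  (((suf s).take s.length).foldl
    (fun (st : Int × Int) v =>
      (st.1 - v, if st.2 < st.1 - v then st.1 - v else st.2)) (eSum s, m)).2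

lemma take_suf_cons (x : Int) (xs : List Int) :
    (suf (x :: xs)).take (x :: xs).length = (x + xs.sum) :: (suf xs).take xs.length := by
  simp [suf, suf_headI]

def tailBest : List Int → Int
  | [] => 0
  | _ :: xs => bestSuf xs

lemma loopFold_eq (s : List Int) (m : Int) (hm : 0 ≤ m) :
    loopFold s m = max m (tailBest s) := by
  induction s generalizing m with
  | nil =>
    simp only [loopFold, tailBest, suf, List.length_nil, List.take_zero, List.foldl_nil]
    simp [max_eq_left hm]
  | cons x xs ih =>
    have step : loopFold (x :: xs) m = loopFold xs (max m (eSum xs)) := by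
      rw [loopFold, take_suf_cons, List.foldl_cons]
      have h1 : eSum (x :: xs) - (x + xs.sum) = eSum xs := by rw [eSum_cons]; ring
      rw [loopFold]
      congr 1
      simp only [h1]
      have h2 : (if m < eSum xs then eSum xs else m) = max m (eSum xs) := by
        rw [max_def]; split_ifs <;> omega
      rw [h2]
    rw [step, ih (max m (eSum xs)) (by omega)]
    cases xs with
    | nil =>
      simp only [tailBest, bestSuf, eSum_nil]
      simp [max_def]
      omega
    | cons y ys =>
      simp only [tailBest, bestSuf]
      simp [max_def]
      split_ifs <;> omega

lemma last_loop (s : List Int) (m : Int) :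
    (List.foldl (fun (st : Int × Int) i =>
        (st.1 - PySem.List.pyGetD (suf s) i 0,
         if st.2 < st.1 - PySem.List.pyGetD (suf s) i 0 then st.1 - PySem.List.pyGetD (suf s) i 0
         else st.2))
      (eSum s, m) (PySem.List.pyRange 0 (s.length : Int) 1)).2 = loopFold s m := by
  have hq : ((suf s).take s.length).length = s.length := by simp [suf_length]
  have hcong :
      List.foldl (fun (st : Int × Int) i =>
        (st.1 - PySem.List.pyGetD (suf s) i 0,
         if st.2 < st.1 - PySem.List.pyGetD (suf s) i 0 then st.1 - PySem.List.pyGetD (suf s) i 0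
         else st.2)) (eSum s, m) (PySem.List.pyRange 0 (s.length : Int) 1)
      = List.foldl (fun (st : Int × Int) i =>
        (st.1 - PySem.List.pyGetD ((suf s).take s.length) i 0,
         if st.2 < st.1 - PySem.List.pyGetD ((suf s).take s.length) i 0 then
           st.1 - PySem.List.pyGetD ((suf s).take s.length) i 0
         else st.2)) (eSum s, m) (PySem.List.pyRange 0 (s.length : Int) 1) := by
    apply PySem.List.foldl_congr_mem
    intro acc i hi
    rcases (PySem.List.mem_pyRange_one).mp hi with ⟨h0, hlt⟩
    have hget : PySem.List.pyGetD (suf s) i 0 = PySem.List.pyGetD ((suf s).take s.length) i 0 := by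
      rw [show i = ((i.toNat : Nat) : Int) by omega, PySem.List.pyGetD_natCast,
        PySem.List.pyGetD_natCast,
        List.getD_eq_getElem _ _ (by simp [suf_length]; omega),
        List.getD_eq_getElem _ _ (by rw [hq]; omega)]
      exact (List.getElem_take).symm
    rw [hget]
  rw [hcong]
  have hlen : (s.length : Int) = (((suf s).take s.length).length : Int) := by rw [hq]
  rw [hlen, PySem.List.foldl_pyRange_zero_pyGetD' ((suf s).take s.length) 0
    (fun (st : Int × Int) v => (st.1 - v, if st.2 < st.1 - v then st.1 - v else st.2))
    (eSum s, m)]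
  rfl

lemma firstSum_eq (s : List Int) (a : Int) :
    (PySem.List.pyRange 0 (PySem.List.len s) 1).foldl
      (fun fs i => fs + (i + 1) * PySem.List.pyGetD s i 0) a = a + eSum s := by
  rw [PySem.List.foldl_add]
  congr 1
  rw [eSum, PySem.List.enumerate_eq_map_pyRange (d := 0), List.map_map]
  rfl

lemma alt_eq_M (satisfaction : List Int) :
    maxSatisfaction_alt satisfaction
      = M 0 (PySem.List.sorted satisfaction (fun x => x) false).reverse := by
  rw [maxSatisfaction_alt,
    altGo_eq_M _ 0 0 (List.pairwise_reverse.mpr (PySem.List.sorted_pairwise _ _)) le_rfl]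
  ring

lemma final_max (s : List Int) :
    max (max 0 (eSum s)) (tailBest s) = M 0 s.reverse := by
  rw [← bestSuf_eq_M]
  cases s with
  | nil =>
    simp [tailBest, bestSuf, eSum_nil]
  | cons x xs =>
    have h1 := bestSuf_nonneg xs
    simp only [tailBest, bestSuf]
    simp [max_def]
    split_ifs <;> omega

-- ===== VERDICT (by name: the statement is the Claim_ definition above) =====
theorem maxSatisfaction_spec : Claim_equal_maxSatisfaction := by
  intro satisfaction _
  unfold Spec_maxSatisfaction
  rw [alt_eq_M]
  by_cases h1 : PySem.List.len satisfaction = 1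
  · -- length-1 branch of A
    have hlen : satisfaction.length = 1 := by simp [PySem.List.len] at h1; omega
    obtain ⟨x, hx⟩ : ∃ x, satisfaction = [x] := by
      cases satisfaction with
      | nil => simp at hlen
      | cons y ys =>
        cases ys with
        | nil => exact ⟨y, rfl⟩
        | cons z zs => simp at hlen
    subst hx
    have hsorted : PySem.List.sorted [x] (fun x => x) false = [x] :=
      PySem.List.sorted_eq_self_of_pairwise _ _ (List.pairwise_singleton _ _)
    rw [maxSatisfaction]
    simp only [h1, if_pos, hsorted]
    simp [M, PySem.List.pyGetD, max_def]
    split_ifs <;> omega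
  · -- general branch of A
    set s : List Int := PySem.List.sorted satisfaction (fun x => x) false with hs
    have hlen_s : s.length = satisfaction.length := PySem.List.length_sorted _ _ _
    have hn : PySem.List.len satisfaction = (s.length : Int) := by
      simp [PySem.List.len, hlen_s]
    have h1' : PySem.List.len satisfaction ≠ 1 := h1
    rw [maxSatisfaction]
    simp only [← hs, hn]
    rw [if_neg (hn ▸ h1')]
    have hfs : List.foldl (fun fs i => fs + (i + 1) * PySem.List.pyGetD s i 0) 0
        (PySem.List.pyRange 0 (s.length : Int) 1) = eSum s := by
      have := firstSum_eq s 0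
      simpa [PySem.List.len] using this
    have hsuf : List.foldl
        (fun arr i => arr.set i.toNat (PySem.List.pyGetD arr (i + 1) 0 + PySem.List.pyGetD s i 0))
        (List.map (fun _ => (0 : Int)) (PySem.List.pyRange 0 ((s.length : Int) + 1) 1))
        (PySem.List.pyRange ((s.length : Int) - 1) (-1) (-1)) = suf s := by
      apply sa_sum_loop s s.length le_rfl
      · simp [PySem.List.length_pyRange_one]
      · rw [List.drop_length, suf]
        rw [show (fun _ : Int => (0 : Int)) = Function.const Int (0 : Int) from rfl,
          List.map_const, List.drop_replicate]
        rw [PySem.List.length_pyRange_one]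
        norm_num
    rw [hfs, hsuf]
    have hm0 : (if 0 < eSum s then eSum s else 0) = max 0 (eSum s) := by
      rw [max_def]; split_ifs <;> omega
    rw [hm0, last_loop, loopFold_eq s _ (le_max_left _ _), final_max]
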